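-- pv_equiv track=rewrite | github.com/tejasv007/DSA | Array/array1.py | duplicates3
-- ===== SOURCE A (Python) =====
-- def duplicates3(a:list):
--     new=[]
--     if len(a)==1:
--         return a
--     new.append(a[0])
--     for i in range(1,len(a)):
--         if a[i-1]!=a[i]:
--             new.append(a[i])
--     for i in range(len(a)):
--         if i<len(new):
--             a[i]=new[i]
--         else:
--             a[i]="_"
--     return a
-- ===== SOURCE B (Python) =====
-- def duplicates3(a: list):
--     # In-place two-pointer compaction; returns [] (no exception) on the empty list.
--     w = 1
--     for i in range(1, len(a)):
--         if a[i] != a[i - 1]: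
--             a[w] = a[i]
--             w += 1
--     for i in range(w, len(a)):
--         a[i] = "_"
--     return a
-- ===== Notes on version B (the rewrite author's own statement) =====
-- stated objective: simpler
-- what changed: Replaces A's auxiliary `new` list plus full copy-back pass by a single in-place two-pointer compaction with a write cursor, then fills the tail with underscores; no auxiliary list and no len(a)==1 special case.
import Mathlib
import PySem

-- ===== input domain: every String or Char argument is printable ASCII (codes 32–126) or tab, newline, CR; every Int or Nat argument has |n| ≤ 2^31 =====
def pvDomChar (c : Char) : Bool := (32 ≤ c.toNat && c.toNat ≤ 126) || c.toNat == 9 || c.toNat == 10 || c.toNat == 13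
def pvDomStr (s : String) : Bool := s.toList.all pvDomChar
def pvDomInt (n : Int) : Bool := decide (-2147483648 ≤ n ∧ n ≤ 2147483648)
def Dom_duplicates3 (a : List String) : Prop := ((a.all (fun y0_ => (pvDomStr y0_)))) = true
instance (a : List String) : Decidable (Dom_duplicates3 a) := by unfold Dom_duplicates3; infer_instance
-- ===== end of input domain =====

-- B replaces A's auxiliary `new` list and copy-back pass by a single in-place two-pointer
-- compaction (write cursor `w`) followed by filling the tail with "_" (objective: simpler).
-- Both Pythons mutate the argument list in place; the equivalence proved here is about the
-- RETURN value (both return the mutated list itself, so the mutations coincide as well).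

-- ===== PORT A =====
-- loop body of A's first for-loop (indices are always in range, so getD's default is never used)
def stepA (a : List String) (new : List String) (i : Nat) : List String :=
  if a.getD (i-1) "" ≠ a.getD i "" then new ++ [a.getD i ""] else new

def duplicates3 (a : List String) : List String :=
  if a.length = 1 then a
  else
    -- new=[a[0]]: Python raises IndexError on [] — excluded by Pre_duplicates3
    let new := (List.range' 1 (a.length - 1)).foldl (stepA a) [a.getD 0 ""]
    (List.range a.length).foldl
      (fun r i => if i < new.length then r.set i (new.getD i "") else r.set i "_") a

-- ===== PORT B =====
-- loop body of B's compaction loop: state = (mutated list, write cursor w)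
def stepB (st : List String × Nat) (i : Nat) : List String × Nat :=
  if st.1.getD i "" ≠ st.1.getD (i-1) "" then (st.1.set st.2 (st.1.getD i ""), st.2 + 1) else st

def duplicates3_alt (a : List String) : List String :=
  let st := (List.range' 1 (a.length - 1)).foldl stepB (a, 1)
  (List.range' st.2 (a.length - st.2)).foldl (fun r i => r.set i "_") st.1

-- ===== PRECONDITION & SPEC =====
-- Pre_ excludes only the empty list, on which Python A raises IndexError (a[0]).
def Pre_duplicates3 (a : List String) : Prop := a ≠ []
instance (a : List String) : Decidable (Pre_duplicates3 a) := by unfold Pre_duplicates3; infer_instance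
def pvWitness_duplicates3 : List String := ["a", "a", "b"]

def Spec_duplicates3 (a : List String) (out : List String) : Prop := out = duplicates3_alt a
instance (a : List String) (out : List String) : Decidable (Spec_duplicates3 a out) := by unfold Spec_duplicates3; infer_instance

-- ===== CLAIM (what is proved, stated in full; the proofs are below) =====
def Claim_equal_duplicates3 : Prop := ∀ (a : List String), Dom_duplicates3 a → Pre_duplicates3 a → Spec_duplicates3 a (duplicates3 a)

-- ===== LEMMAS AND PROOFS =====

-- getD through ++/drop at an index at or past the left part
lemma getD_append_drop (new a : List String) (j : Nat) (h : new.length ≤ j) :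
    (new ++ a.drop new.length).getD j "" = a.getD j "" := by
  have h2 : j = new.length + (j - new.length) := by omega
  rw [h2]
  simp [List.getD, List.getElem?_append_right, List.getElem?_drop]

-- Loop invariant tying B's compaction state to A's `new` list after the indices 1..k:
-- B's list is A's `new` followed by the untouched tail of `a`, the cursor is `new.length`,
-- and if no duplicate has been seen the prefix processed so far is an unchanged prefix of `a`.
lemma dup_inv (a : List String) : ∀ (k : Nat), k + 1 ≤ a.length →
    ((List.range' 1 k).foldl stepB (a, 1)
        = ((List.range' 1 k).foldl (stepA a) [a.getD 0 ""] ++ a.drop ((List.range' 1 k).foldl (stepA a) [a.getD 0 ""]).length,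
           ((List.range' 1 k).foldl (stepA a) [a.getD 0 ""]).length))
    ∧ ((List.range' 1 k).foldl (stepA a) [a.getD 0 ""]).length ≤ k + 1
    ∧ (((List.range' 1 k).foldl (stepA a) [a.getD 0 ""]).length = k + 1 →
        (List.range' 1 k).foldl (stepA a) [a.getD 0 ""] = a.take (k+1)) := by
  intro k
  induction k with
  | zero =>
    intro h1
    rcases a with _ | ⟨x, t⟩
    · simp at h1
    · refine ⟨?_, by simp, ?_⟩
      · simp [List.getD]
      · intro _; simp [List.getD]
  | succ k ih =>
    intro hk
    obtain ⟨hst, hle, hfull⟩ := ih (by omega)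
    set new := (List.range' 1 k).foldl (stepA a) [a.getD 0 ""] with hnew
    have hconc : List.range' 1 (k+1) = List.range' 1 k ++ [1+k] := List.range'_1_concat
    have h1k : 1 + k = k + 1 := by omega
    rw [hconc, h1k, List.foldl_append, List.foldl_append, ← hnew, hst]
    simp only [List.foldl_cons, List.foldl_nil]
    -- the values B reads from its mutated list are the original values of `a`
    have hkp1 : (new ++ a.drop new.length).getD (k+1) "" = a.getD (k+1) "" :=
      getD_append_drop new a (k+1) (by omega)
    have hkread : (new ++ a.drop new.length).getD k "" = a.getD k "" := by
      by_cases hwk : new.length ≤ k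
      · exact getD_append_drop new a k hwk
      · have hw : new.length = k + 1 := by omega
        have hidq : new ++ a.drop new.length = a := by
          rw [hfull hw]
          have hl : (a.take (k+1)).length = k + 1 := by simp; omega
          rw [hl]
          exact List.take_append_drop (k+1) a
        rw [hidq]
    unfold stepA stepB
    dsimp only
    rw [Nat.add_sub_cancel, hkp1, hkread]
    by_cases hne : a.getD k "" = a.getD (k+1) ""
    · -- duplicate: neither side changes
      rw [if_neg (by simp only [ne_eq, not_not]; exact hne.symm),
          if_neg (by simp only [ne_eq, not_not]; exact hne)]
      exact ⟨hst ▸ rfl, by omega, by intro h; omega⟩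
    · -- a[k] ≠ a[k+1]: A appends, B writes at the cursor
      rw [if_pos (by simpa using (Ne.symm hne)), if_pos (by simpa using hne)]
      have hwlt : new.length < a.length := by omega
      have hdropcons : a.drop new.length = a[new.length] :: a.drop (new.length + 1) :=
        List.drop_eq_getElem_cons hwlt
      have hset : (new ++ a.drop new.length).set new.length (a.getD (k+1) "")
          = (new ++ [a.getD (k+1) ""]) ++ a.drop (new.length + 1) := by
        rw [hdropcons, List.set_append]
        simp
        rw [hdropcons]
        rfl
      refine ⟨?_, by simp; omega, ?_⟩
      · rw [hset]
        simp
      · intro hfull'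
        have hw : new.length = k + 1 := by simpa using hfull'
        rw [hfull hw]
        have hlt : k + 1 < a.length := by omega
        have hta : a.take (k+1+1) = a.take (k+1) ++ [a[k+1]] := by
          rw [List.take_add_one]
          simp [List.getElem?_eq_getElem hlt]
        rw [hta]
        simp [List.getD, List.getElem?_eq_getElem hlt]

-- generic write-back: folding `set i (g i)` over range' s m overwrites the middle slice
lemma foldl_set_range (g : Nat → String) : ∀ (m s : Nat) (r : List String), s + m ≤ r.length →
    (List.range' s m).foldl (fun r i => r.set i (g i)) r
      = r.take s ++ (List.range' s m).map g ++ r.drop (s + m) := by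
  intro m
  induction m with
  | zero => intro s r _; simp
  | succ m ih =>
    intro s r h
    rw [List.range'_succ, List.foldl_cons, ih (s+1) (r.set s (g s)) (by simp; omega)]
    have hs : s < r.length := by omega
    have htake : (r.set s (g s)).take (s+1) = r.take s ++ [g s] := by
      simp only [List.take_add_one]
      rw [List.getElem?_set_self (by simpa using hs), List.take_set]
      have hns : (r.take s).set s (g s) = r.take s := by
        apply List.set_eq_of_length_le; simp
      simp [hns]
    have hdrop : (r.set s (g s)).drop (s+1+m) = r.drop (s+1+m) := by
      rw [List.drop_set]
      simp [Nat.lt_of_lt_of_le (by omega : s < s+1+m)]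
    rw [htake, hdrop, List.map_cons]
    have harr : s + (m + 1) = s + 1 + m := by omega
    rw [harr]
    simp [List.append_assoc]

-- A's second loop written as `set i (value)` with the branch pushed inside
lemma a_writeback_eq (new a : List String) :
    (List.range a.length).foldl
        (fun r i => if i < new.length then r.set i (new.getD i "") else r.set i "_") a
      = (List.range a.length).foldl
        (fun r i => r.set i (if i < new.length then new.getD i "" else "_")) a := by
  congr 1
  funext r i
  by_cases h : i < new.length <;> simp [h]

lemma map_g_eq (new : List String) (n : Nat) (h : new.length ≤ n) :
    (List.range' 0 n).map (fun i => if i < new.length then new.getD i "" else "_")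
      = new ++ List.replicate (n - new.length) "_" := by
  apply List.ext_getElem
  · simp; omega
  · intro i h1 h2
    simp only [List.getElem_map, List.getElem_range']
    by_cases hi : i < new.length
    · rw [if_pos (by simpa using hi), List.getElem_append_left hi]
      simp [List.getD, List.getElem?_eq_getElem hi]
    · rw [if_neg (by simpa using hi), List.getElem_append_right (by omega)]
      simp

-- the two sides both compute new ++ "_"-padding; main equivalence for length ≥ 2
lemma main_eq (a : List String) (h2 : 2 ≤ a.length) :
    duplicates3 a = duplicates3_alt a := by
  obtain ⟨hst, hle, -⟩ := dup_inv a (a.length - 1) (by omega)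
  unfold duplicates3 duplicates3_alt
  rw [if_neg (by omega)]
  set new := (List.range' 1 (a.length - 1)).foldl (stepA a) [a.getD 0 ""] with hnew
  rw [hst]
  dsimp only
  have hwn : new.length ≤ a.length := by omega
  -- A side
  rw [a_writeback_eq new a, List.range_eq_range']
  rw [foldl_set_range _ a.length 0 a (by omega)]
  rw [map_g_eq new a.length hwn]
  -- B side
  rw [foldl_set_range (fun _ => "_") (a.length - new.length) new.length (new ++ a.drop new.length) (by simp only [List.length_append, List.length_drop]; omega)]
  have hmapc : (List.range' new.length (a.length - new.length)).map (fun _ => "_")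
      = List.replicate (a.length - new.length) "_" := by
    rw [List.map_const']
    simp
  rw [hmapc]
  have htl : (new ++ a.drop new.length).take new.length = new := by
    simp
  have hdr : (new ++ a.drop new.length).drop (new.length + (a.length - new.length)) = [] := by
    apply List.drop_eq_nil_of_le
    simp only [List.length_append, List.length_drop]
    omega
  rw [htl, hdr]
  simp

-- ===== VERDICT (by name: the statement is the Claim_ definition above) =====
theorem duplicates3_spec : Claim_equal_duplicates3 := by
  intro a _ hpre
  unfold Spec_duplicates3
  rcases a with _ | ⟨x, _ | ⟨y, t⟩⟩
  · exact absurd rfl hpre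
  · -- length 1: both sides return the list unchanged
    unfold duplicates3 duplicates3_alt
    simp
  · exact main_eq _ (by simp only [List.length_cons]; omega)
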